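-- pv_equiv track=rewrite | github.com/kevin-v96/codesignal-arcade | Intro/46 - electionsWinners.py | solution
-- ===== SOURCE A (Python) =====
-- from collections import Counter
--
-- def solution(votes, k):
--     potential_winners = 0
--     for i in range(len(votes)):
--         new_votes = votes.copy()
--         new_votes[i] += k
--         new_counts = Counter(new_votes)
--         max_votes = max(new_votes)
--         if new_votes[i] == max_votes and new_counts[max_votes] < 2:
--             potential_winners += 1
--
--     return potential_winners
-- ===== SOURCE B (Python) =====
-- def solution(votes, k):
--     # O(n): precompute max, its multiplicity, and the best strictly-smaller value,
--     # then one pass deciding each candidate against the max of the others.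
--     if not votes:
--         return 0
--     m1 = max(votes)
--     c = votes.count(m1)
--     losers = [v for v in votes if v < m1]
--     m2 = max(losers) if losers else None
--     total = 0
--     for v in votes:
--         if v == m1 and c == 1:
--             if m2 is None or v + k > m2:
--                 total += 1
--         elif v + k > m1:
--             total += 1
--     return total
-- ===== Notes on version B (the rewrite author's own statement) =====
-- stated objective: faster
-- what changed: Replaced the per-candidate copy/Counter/max rescan (O(n^2)) with one precomputation of the maximum, its multiplicity and the best strictly-smaller value, then a single pass comparing each candidate's boosted total against the maximum of the others.
import Mathlib
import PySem

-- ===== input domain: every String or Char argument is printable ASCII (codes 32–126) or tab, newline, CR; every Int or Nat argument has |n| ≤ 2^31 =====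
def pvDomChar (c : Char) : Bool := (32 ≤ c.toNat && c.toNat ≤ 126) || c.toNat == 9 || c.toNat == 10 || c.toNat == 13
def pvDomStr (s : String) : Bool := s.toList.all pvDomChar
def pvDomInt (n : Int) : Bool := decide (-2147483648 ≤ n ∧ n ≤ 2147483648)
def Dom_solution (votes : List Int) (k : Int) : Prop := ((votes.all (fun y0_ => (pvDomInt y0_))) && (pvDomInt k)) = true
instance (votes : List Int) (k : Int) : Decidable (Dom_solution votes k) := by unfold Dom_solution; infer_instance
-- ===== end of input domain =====

-- B replaces A's per-candidate copy/Counter/max rescan with an O(n) precomputation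
-- (max, its multiplicity, best strictly-smaller value) and a single deciding pass.

-- ===== PORT A =====
def solution (votes : List Int) (k : Int) : Int :=
  (PySem.List.pyRange 0 votes.length 1).foldl (fun potential_winners i =>
    -- new_votes = votes.copy(); new_votes[i] += k
    let new_votes := PySem.List.pySetD votes i (PySem.List.pyGetD votes i 0 + k)
    -- new_counts = Counter(new_votes)
    let new_counts := PySem.Dict.counter new_votes
    -- max_votes = max(new_votes)  (never raises: the loop body only runs when votes ≠ [])
    match PySem.List.max? new_votes (fun x => x) with
    | none => potential_winners
    | some max_votes =>
        if PySem.List.pyGetD new_votes i 0 = max_votes ∧ new_counts.getD max_votes 0 < 2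
        then potential_winners + 1 else potential_winners) 0

-- ===== PORT B =====
def solution_alt (votes : List Int) (k : Int) : Int :=
  match PySem.List.max? votes (fun x => x) with
  | none => 0              -- if not votes: return 0
  | some m1 =>
    let c := PySem.List.count votes m1
    let losers := votes.filter (fun v => decide (v < m1))
    let m2 := PySem.List.max? losers (fun x => x)
    votes.foldl (fun total v =>
      if v = m1 ∧ c = 1 then
        match m2 with
        | none => total + 1
        | some s => if v + k > s then total + 1 else total
      else if v + k > m1 then total + 1 else total) 0

-- ===== PRECONDITION & SPEC =====
def Spec_solution (votes : List Int) (k : Int) (out : Int) : Prop := out = solution_alt votes k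
instance (votes : List Int) (k : Int) (out : Int) : Decidable (Spec_solution votes k out) := by unfold Spec_solution; infer_instance

-- ===== CLAIM (what is proved, stated in full; the proofs are below) =====
def Claim_equal_solution : Prop := ∀ (votes : List Int) (k : Int), Dom_solution votes k → Spec_solution votes k (solution votes k)

-- ===== LEMMAS AND PROOFS =====

-- the Boolean decision A makes for index i
def cA (votes : List Int) (k : Int) (i : Int) : Bool :=
  let nv := PySem.List.pySetD votes i (PySem.List.pyGetD votes i 0 + k)
  match PySem.List.max? nv (fun x => x) with
  | none => false
  | some m =>
      decide (PySem.List.pyGetD nv i 0 = m) && decide ((PySem.Dict.counter nv).getD m 0 < 2)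

-- the Boolean decision B makes for an element v
def cB (m1 : Int) (c : Nat) (m2 : Option Int) (k : Int) (v : Int) : Bool :=
  if v = m1 ∧ c = 1 then
    match m2 with
    | none => true
    | some s => decide (v + k > s)
  else decide (v + k > m1)

lemma foldl_if_count {β : Type} (l : List β) (p : β → Bool) (f : Int → β → Int)
    (hf : ∀ acc x, f acc x = acc + (if p x then 1 else 0)) (a : Int) :
    l.foldl f a = a + (l.countP p : Int) := by
  induction l generalizing a with
  | nil => simp
  | cons x t ih =>
    simp only [List.foldl_cons, ih, hf, List.countP_cons]
    by_cases h : p x <;> simp [h] <;> omega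

lemma opt_step (acc : Int) (o : Option Int) (P Q : Int → Prop)
    [DecidablePred P] [DecidablePred Q] :
    (match o with
     | none => acc
     | some m => if P m ∧ Q m then acc + 1 else acc)
    = acc + (if (match o with
                 | none => false
                 | some m => decide (P m) && decide (Q m)) then 1 else 0) := by
  cases o with
  | none => simp
  | some m => by_cases hP : P m <;> by_cases hQ : Q m <;> simp [hP, hQ]

lemma solution_eq_countP (votes : List Int) (k : Int) :
    solution votes k = ((List.range votes.length).countP (fun j : Nat => cA votes k (j : Int)) : Int) := by
  unfold solution
  rw [show ((votes.length : Int)) = ((votes.length : Nat) : Int) from rfl,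
      PySem.List.pyRange_zero, Int.toNat_natCast]
  refine Eq.trans (foldl_if_count _ (cA votes k) _ ?_ 0) ?_
  · intro acc i
    exact opt_step acc
      (PySem.List.max? (PySem.List.pySetD votes i (PySem.List.pyGetD votes i 0 + k)) (fun x => x))
      (fun m => PySem.List.pyGetD (PySem.List.pySetD votes i (PySem.List.pyGetD votes i 0 + k)) i 0 = m)
      (fun m => (PySem.Dict.counter (PySem.List.pySetD votes i (PySem.List.pyGetD votes i 0 + k))).getD m 0 < 2)
  · rw [List.countP_map, zero_add]
    simp only [Function.comp_def]

lemma alt_eq_countP (votes : List Int) (k m1 : Int)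
    (hm1 : PySem.List.max? votes (fun x => x) = some m1) :
    solution_alt votes k =
      (votes.countP (cB m1 (PySem.List.count votes m1)
        (PySem.List.max? (votes.filter (fun v => decide (v < m1))) (fun x => x)) k) : Int) := by
  simp only [solution_alt, hm1]
  refine Eq.trans (foldl_if_count votes _ _ ?_ 0) (zero_add _)
  intro acc v
  simp only [cB]
  cases hm2 : PySem.List.max? (votes.filter (fun v => decide (v < m1))) (fun x => x) with
  | none =>
    by_cases h1 : v = m1 ∧ PySem.List.count votes m1 = 1 <;> split_ifs <;> simp_all <;> omega
  | some s =>
    by_cases h1 : v = m1 ∧ PySem.List.count votes m1 = 1 <;> split_ifs <;> simp_all <;> omega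

lemma getD_append_length (l1 l2 : List Int) (v d : Int) :
    (l1 ++ v :: l2).getD l1.length d = v := by
  rw [List.getD_eq_getElem _ _ (by simp)]
  simp

lemma set_append_length (l1 l2 : List Int) (v w : Int) :
    (l1 ++ v :: l2).set l1.length w = l1 ++ w :: l2 := by
  rw [List.set_append]
  simp

-- core: A's decision at index |l1| equals B's decision at the element there
lemma pointwise (l1 l2 : List Int) (v k m1 : Int)
    (hm1 : PySem.List.max? (l1 ++ v :: l2) (fun x => x) = some m1) :
    cA (l1 ++ v :: l2) k (l1.length : Int) =
      cB m1 (PySem.List.count (l1 ++ v :: l2) m1)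
        (PySem.List.max? ((l1 ++ v :: l2).filter (fun x => decide (x < m1))) (fun x => x)) k v := by
  have hm1mem : m1 ∈ l1 ++ v :: l2 := PySem.List.max?_mem hm1
  have hm1le : ∀ y ∈ l1 ++ v :: l2, y ≤ m1 := PySem.List.max?_id_le hm1
  have hmemv : ∀ x ∈ l1 ++ l2, x ∈ l1 ++ v :: l2 := by
    intro x hx; rcases List.mem_append.mp hx with h | h <;> simp [h]
  have hget : PySem.List.pyGetD (l1 ++ v :: l2) (l1.length : Int) 0 = v := by
    rw [PySem.List.pyGetD_natCast]; exact getD_append_length l1 l2 v 0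
  have hset : PySem.List.pySetD (l1 ++ v :: l2) (l1.length : Int) (v + k) = l1 ++ (v + k) :: l2 := by
    rw [PySem.List.pySetD_natCast]; exact set_append_length l1 l2 v (v + k)
  obtain ⟨M, hM⟩ : ∃ M, PySem.List.max? (l1 ++ (v + k) :: l2) (fun x => x) = some M := by
    cases h : PySem.List.max? (l1 ++ (v + k) :: l2) (fun x => x) with
    | none => exact absurd ((PySem.List.max?_eq_none_iff _ _).mp h) (by simp)
    | some M => exact ⟨M, rfl⟩
  have hgetw : PySem.List.pyGetD (l1 ++ (v + k) :: l2) (l1.length : Int) 0 = v + k := by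
    rw [PySem.List.pyGetD_natCast]; exact getD_append_length _ _ _ _
  have hA : cA (l1 ++ v :: l2) k (l1.length : Int)
      = (decide (v + k = M) && decide (((List.count M (l1 ++ (v + k) :: l2) : Int)) < 2)) := by
    simp only [cA, hget, hset, hM, hgetw, PySem.Dict.getD_counter]
  have hmemw : ∀ x ∈ l1 ++ l2, x ∈ l1 ++ (v + k) :: l2 := by
    intro x hx; rcases List.mem_append.mp hx with h | h <;> simp [h]
  have keyA : (v + k = M ∧ ((List.count M (l1 ++ (v + k) :: l2) : Int)) < 2)
      ↔ (∀ x ∈ l1 ++ l2, x < v + k) := by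
    constructor
    · rintro ⟨hwM, hcnt⟩
      intro x hx
      have hle : x ≤ v + k := by
        have := PySem.List.max?_id_le hM x (hmemw x hx); omega
      rcases eq_or_lt_of_le hle with heq | hlt
      · exfalso
        have hc2 : List.count M (l1 ++ (v + k) :: l2) < 2 := by exact_mod_cast hcnt
        have hcc : List.count M (l1 ++ (v + k) :: l2)
            = List.count M l1 + List.count M l2 + 1 := by
          subst hwM; rw [List.count_append, List.count_cons_self]; omega
        have hx' : M ∈ l1 ∨ M ∈ l2 := by
          rw [← hwM, ← heq]
          exact List.mem_append.mp hx
        rcases hx' with h | h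
        · have := (List.count_pos_iff (a := M) (l := l1)).mpr h; omega
        · have := (List.count_pos_iff (a := M) (l := l2)).mpr h; omega
      · exact hlt
    · intro hP
      have hwmem : v + k ∈ l1 ++ (v + k) :: l2 := by simp
      have hwle : v + k ≤ M := PySem.List.max?_id_le hM _ hwmem
      have hMle : M ≤ v + k := by
        rcases List.mem_append.mp (PySem.List.max?_mem hM) with h | h
        · exact le_of_lt (hP M (List.mem_append.mpr (Or.inl h)))
        · rcases List.mem_cons.mp h with h | h
          · omega
          · exact le_of_lt (hP M (List.mem_append.mpr (Or.inr h)))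
      have hwM : v + k = M := le_antisymm hwle hMle
      refine ⟨hwM, ?_⟩
      have h1 : M ∉ l1 := fun h => absurd (hP M (List.mem_append.mpr (Or.inl h))) (by omega)
      have h2 : M ∉ l2 := fun h => absurd (hP M (List.mem_append.mpr (Or.inr h))) (by omega)
      have hcc : List.count M (l1 ++ (v + k) :: l2)
          = List.count M l1 + List.count M l2 + 1 := by
        subst hwM; rw [List.count_append, List.count_cons_self]; omega
      have c1 := List.count_eq_zero.mpr h1
      have c2 := List.count_eq_zero.mpr h2
      have : List.count M (l1 ++ (v + k) :: l2) = 1 := by omega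
      rw [this]; norm_num
  have keyB : (cB m1 (PySem.List.count (l1 ++ v :: l2) m1)
        (PySem.List.max? ((l1 ++ v :: l2).filter (fun x => decide (x < m1))) (fun x => x)) k v = true)
      ↔ (∀ x ∈ l1 ++ l2, x < v + k) := by
    rw [PySem.List.count_eq]
    by_cases h1 : v = m1 ∧ List.count m1 (l1 ++ v :: l2) = 1
    · -- v is the unique maximum
      have hvm : v = m1 := h1.1
      have hcc : List.count m1 (l1 ++ v :: l2)
          = List.count m1 l1 + List.count m1 l2 + 1 := by
        subst hvm; rw [List.count_append, List.count_cons_self]; omega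
      have h01 : m1 ∉ l1 := by
        intro h; have := (List.count_pos_iff (a := m1) (l := l1)).mpr h
        have h2 := h1.2; omega
      have h02 : m1 ∉ l2 := by
        intro h; have := (List.count_pos_iff (a := m1) (l := l2)).mpr h
        have h2 := h1.2; omega
      have hlt : ∀ x ∈ l1 ++ l2, x < m1 := by
        intro x hx
        have hle := hm1le x (hmemv x hx)
        rcases eq_or_lt_of_le hle with heq | h
        · exfalso; rw [heq] at hx
          rcases List.mem_append.mp hx with h | h
          · exact h01 h
          · exact h02 h
        · exact h
      simp only [cB, if_pos h1]
      cases hm2 : PySem.List.max? ((l1 ++ v :: l2).filter (fun x => decide (x < m1))) (fun x => x) with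
      | none =>
        have hnil := (PySem.List.max?_eq_none_iff _ _).mp hm2
        rw [List.filter_eq_nil_iff] at hnil
        simp only [true_iff]
        intro x hx
        exact absurd (by simpa using hlt x hx) (hnil x (hmemv x hx))
      | some s =>
        have hsf := PySem.List.max?_mem hm2
        rw [List.mem_filter] at hsf
        have hsmem : s ∈ l1 ++ v :: l2 := hsf.1
        have hslt : s < m1 := by simpa using hsf.2
        have hsle := PySem.List.max?_id_le hm2
        simp only [decide_eq_true_eq]
        constructor
        · intro hs x hx
          have hxf : x ∈ (l1 ++ v :: l2).filter (fun x => decide (x < m1)) :=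
            List.mem_filter.mpr ⟨hmemv x hx, by simpa using hlt x hx⟩
          have := hsle x hxf
          omega
        · intro hP
          have : s ∈ l1 ++ l2 := by
            rcases List.mem_append.mp hsmem with h | h
            · exact List.mem_append.mpr (Or.inl h)
            · rcases List.mem_cons.mp h with h | h
              · exfalso; omega
              · exact List.mem_append.mpr (Or.inr h)
          have := hP s this
          omega
    · -- some other candidate also holds the maximum
      simp only [cB, if_neg h1, decide_eq_true_eq]
      constructor
      · intro hw x hx
        have := hm1le x (hmemv x hx)
        omega
      · intro hP
        have hmem12 : m1 ∈ l1 ++ l2 := by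
          by_cases hvm : v = m1
          · have hcge : 1 ≤ List.count m1 (l1 ++ v :: l2) := List.count_pos_iff.mpr hm1mem
            have hne1 : List.count m1 (l1 ++ v :: l2) ≠ 1 := fun h => h1 ⟨hvm, h⟩
            have hcc : List.count m1 (l1 ++ v :: l2)
                = List.count m1 l1 + List.count m1 l2 + 1 := by
              subst hvm; rw [List.count_append, List.count_cons_self]; omega
            have : 0 < List.count m1 l1 ∨ 0 < List.count m1 l2 := by omega
            rcases this with h | h
            · exact List.mem_append.mpr (Or.inl (List.count_pos_iff.mp h))
            · exact List.mem_append.mpr (Or.inr (List.count_pos_iff.mp h))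
          · rcases List.mem_append.mp hm1mem with h | h
            · exact List.mem_append.mpr (Or.inl h)
            · rcases List.mem_cons.mp h with h | h
              · exact absurd h.symm hvm
              · exact List.mem_append.mpr (Or.inr h)
        exact hP m1 hmem12
  rw [hA, Bool.eq_iff_iff, Bool.and_eq_true, decide_eq_true_eq, decide_eq_true_eq, keyB]
  exact keyA

lemma map_getD_range (l : List Int) :
    (List.range l.length).map (fun j => l.getD j 0) = l := by
  apply List.ext_getElem
  · simp
  · intro i h1 h2
    simp only [List.getElem_map, List.getElem_range]
    exact List.getD_eq_getElem l 0 h2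

lemma countP_main (votes : List Int) (k m1 : Int)
    (hm1 : PySem.List.max? votes (fun x => x) = some m1) :
    (List.range votes.length).countP (fun j : Nat => cA votes k (j : Int)) =
      votes.countP (cB m1 (PySem.List.count votes m1)
        (PySem.List.max? (votes.filter (fun v => decide (v < m1))) (fun x => x)) k) := by
  set q := cB m1 (PySem.List.count votes m1)
      (PySem.List.max? (votes.filter (fun v => decide (v < m1))) (fun x => x)) k with hq
  conv_rhs => rw [← map_getD_range votes]
  rw [List.countP_map]
  apply List.countP_congr
  intro j hj
  rw [List.mem_range] at hj
  have hsplit : votes = votes.take j ++ votes[j] :: votes.drop (j + 1) := by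
    rw [List.getElem_cons_drop, List.take_append_drop]
  have hlen : (votes.take j).length = j := by simp [List.length_take]; omega
  have hpt := pointwise (votes.take j) (votes.drop (j + 1)) votes[j] k m1 (by rw [← hsplit]; exact hm1)
  rw [← hsplit, hlen] at hpt
  simp only [Function.comp_def, List.getD_eq_getElem votes 0 hj, hq, hpt]

-- ===== VERDICT (by name: the statement is the Claim_ definition above) =====
theorem solution_spec : Claim_equal_solution := by
  intro votes k _
  unfold Spec_solution
  cases hm : PySem.List.max? votes (fun x => x) with
  | none =>
    rw [PySem.List.max?_eq_none_iff] at hm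
    subst hm
    rfl
  | some m1 =>
    rw [solution_eq_countP, alt_eq_countP votes k m1 hm, countP_main votes k m1 hm]
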